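-- pv_equiv track=rewrite | github.com/ArpitaDash7/Python-Coding | elearning_data.py | list_teachers_and_subjects
-- ===== SOURCE A (Python) =====
-- def list_teachers_and_subjects(data):
--     teachers_subjects = {}
--
--     for row in data:
--         if row["Role"] == "Teacher":
--             if row["Name"] not in teachers_subjects:
--                 teachers_subjects[row["Name"]] = []
--             teachers_subjects[row["Name"]].append(row["Subject"])
--
--     report = "Teachers and their subjects:\n"
--     for teacher, subjects in teachers_subjects.items():
--         report += f"{teacher}: {', '.join(subjects)}\n"
--
--     return report
-- ===== SOURCE B (Python) =====
-- def list_teachers_and_subjects(data):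
--     # two-phase: dedup pass for teacher names, then per-teacher gather + join
--     teachers = []
--     for row in data:
--         if row["Role"] == "Teacher" and row["Name"] not in teachers:
--             teachers.append(row["Name"])
--     lines = [
--         f"{t}: " + ", ".join(
--             row["Subject"] for row in data
--             if row["Role"] == "Teacher" and row["Name"] == t
--         )
--         for t in teachers
--     ]
--     return "Teachers and their subjects:\n" + "".join(line + "\n" for line in lines)
-- ===== Notes on version B (the rewrite author's own statement) =====
-- stated objective: alternative
-- what changed: Replaces the single-pass dict-of-lists grouping with a two-phase scheme: one dedup pass collects teacher names in first-appearance order, then each teacher's subjects are gathered by a direct scan and the report is built by join instead of += accumulation.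
import Mathlib
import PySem

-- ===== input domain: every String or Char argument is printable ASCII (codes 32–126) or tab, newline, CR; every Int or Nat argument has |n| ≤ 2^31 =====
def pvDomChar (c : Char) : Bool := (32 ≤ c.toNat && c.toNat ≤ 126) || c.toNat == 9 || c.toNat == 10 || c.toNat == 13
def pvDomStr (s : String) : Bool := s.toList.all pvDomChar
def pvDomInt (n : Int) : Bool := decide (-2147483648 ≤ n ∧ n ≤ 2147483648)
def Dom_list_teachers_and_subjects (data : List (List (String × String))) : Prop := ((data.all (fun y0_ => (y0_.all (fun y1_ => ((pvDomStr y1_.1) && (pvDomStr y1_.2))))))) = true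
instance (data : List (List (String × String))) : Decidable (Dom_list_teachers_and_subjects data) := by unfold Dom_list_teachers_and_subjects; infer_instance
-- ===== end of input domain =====

-- B replaces A's single-pass dict-of-lists grouping by a two-phase scheme (dedup pass for
-- teacher names, then a per-teacher gather and a join); alternative decomposition, not faster.

-- row[k] on a Python dict row (first-match association lookup; Pre_ guarantees every accessed key is present)
def pvRowGet (row : List (String × String)) (k : String) : String :=
  (PySem.Dict.mk row).getD k ""

-- ===== PORT A =====
def list_teachers_and_subjects (data : List (List (String × String))) : String :=
  let ts := data.foldl
    (fun (d : PySem.Dict String (List String)) row =>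
      if pvRowGet row "Role" == "Teacher" then
        let d1 := if d.contains (pvRowGet row "Name") then d
                  else d.insert (pvRowGet row "Name") []
        d1.modify (pvRowGet row "Name") [] (fun l => l ++ [pvRowGet row "Subject"])
      else d)
    PySem.Dict.empty
  ts.items.foldl
    (fun report p => report ++ (p.1 ++ ": " ++ PySem.Str.join ", " p.2 ++ "\n"))
    "Teachers and their subjects:\n"

-- ===== PORT B =====
def list_teachers_and_subjects_alt (data : List (List (String × String))) : String :=
  let teachers := data.foldl
    (fun (acc : List String) row =>
      if pvRowGet row "Role" == "Teacher" && !acc.contains (pvRowGet row "Name")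
      then acc ++ [pvRowGet row "Name"] else acc) []
  let lines := teachers.map (fun t =>
    t ++ ": " ++ PySem.Str.join ", "
      ((data.filter (fun row =>
          pvRowGet row "Role" == "Teacher" && pvRowGet row "Name" == t)).map
        (fun row => pvRowGet row "Subject")))
  "Teachers and their subjects:\n" ++ PySem.Str.join "" (lines.map (fun l => l ++ "\n"))

-- ===== PRECONDITION & SPEC =====
-- Pre_: exactly where A returns — every row has key "Role", and a teacher row also has
-- keys "Name" and "Subject" (otherwise Python raises KeyError).
def Pre_list_teachers_and_subjects (data : List (List (String × String))) : Prop :=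
  ∀ row ∈ data, "Role" ∈ row.map Prod.fst ∧
    (pvRowGet row "Role" = "Teacher" →
      "Name" ∈ row.map Prod.fst ∧ "Subject" ∈ row.map Prod.fst)
instance (data : List (List (String × String))) : Decidable (Pre_list_teachers_and_subjects data) := by
  unfold Pre_list_teachers_and_subjects; infer_instance

def pvWitness_list_teachers_and_subjects : (List (List (String × String))) :=
  [[("Role", "Teacher"), ("Name", "Ann"), ("Subject", "Math")],
   [("Role", "Student"), ("Name", "Bob")]]

def Spec_list_teachers_and_subjects (data : List (List (String × String))) (out : String) : Prop := out = list_teachers_and_subjects_alt data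
instance (data : List (List (String × String))) (out : String) : Decidable (Spec_list_teachers_and_subjects data out) := by unfold Spec_list_teachers_and_subjects; infer_instance

-- ===== CLAIM (what is proved, stated in full; the proofs are below) =====
def Claim_equal_list_teachers_and_subjects : Prop := ∀ (data : List (List (String × String))), Dom_list_teachers_and_subjects data → Pre_list_teachers_and_subjects data → Spec_list_teachers_and_subjects data (list_teachers_and_subjects data)

-- ===== LEMMAS AND PROOFS =====

-- abbreviations for the two programs' shared row functions
def pvIsT (row : List (String × String)) : Bool := pvRowGet row "Role" == "Teacher"
def pvName (row : List (String × String)) : String := pvRowGet row "Name"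
def pvSubj (row : List (String × String)) : String := pvRowGet row "Subject"

-- A's loop body: the "insert [] if missing, then append" pair collapses to one modify
lemma pv_stepA (d : PySem.Dict String (List String)) (n s : String) :
    (if d.contains n then d else d.insert n []).modify n []
        (fun l => l ++ [s])
      = d.modify n [] (fun l => l ++ [s]) := by
  by_cases h : d.contains n
  · simp [h]
  · simp only [h, Bool.false_eq_true, if_false]
    unfold PySem.Dict.modify
    rw [PySem.Dict.insert_insert_self]
    simp only [Bool.not_eq_true] at h
    rw [PySem.Dict.getD_insert_self, PySem.Dict.getD_of_not_contains _ _ h]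

-- "".join over a cons
lemma pv_join_empty_cons (s : String) (rest : List String) :
    PySem.Str.join "" (s :: rest) = s ++ PySem.Str.join "" rest := by
  cases rest with
  | nil =>
    simp [PySem.Str.join, PySem.Chars.join, List.intercalate, String.ofList_toList]
  | cons b t =>
    simp only [PySem.Str.join, List.map_cons]
    rw [show ("" : String).toList = [] from rfl, PySem.Chars.join_cons_cons]
    simp [String.ofList_append, String.ofList_toList]

-- 'report += f(x)' over a list is the header followed by "".join of the lines
lemma pv_foldl_append_join {α : Type} (l : List α) (f : α → String) (init : String) :
    l.foldl (fun r x => r ++ f x) init = init ++ PySem.Str.join "" (l.map f) := by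
  induction l generalizing init with
  | nil => simp [PySem.Str.join, PySem.Chars.join, List.intercalate]
  | cons a t ih =>
    rw [List.foldl_cons, ih, List.map_cons, pv_join_empty_cons, String.append_assoc]

-- A's grouping fold, rewritten over the teacher pairs only
lemma pv_dictA_eq (data : List (List (String × String))) :
    data.foldl
      (fun (d : PySem.Dict String (List String)) row =>
        if pvRowGet row "Role" == "Teacher" then
          let d1 := if d.contains (pvRowGet row "Name") then d
                    else d.insert (pvRowGet row "Name") []
          d1.modify (pvRowGet row "Name") [] (fun l => l ++ [pvRowGet row "Subject"])
        else d)
      PySem.Dict.empty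
    = ((data.filter pvIsT).map (fun r => (pvName r, pvSubj r))).foldl
        (fun d p => d.modify p.1 [] (fun l => l ++ [p.2])) PySem.Dict.empty := by
  rw [List.foldl_map, List.foldl_filter]
  apply congrFun
  apply congrFun
  apply congrArg
  funext d row
  by_cases h : pvRowGet row "Role" == "Teacher"
  · simp [pvIsT, pvName, pvSubj, h, pv_stepA]
  · simp [pvIsT, h]

-- B's first pass is the ordered dedup of the teacher names
lemma pv_teachersB_eq (data : List (List (String × String))) :
    data.foldl
      (fun (acc : List String) row =>
        if pvRowGet row "Role" == "Teacher" && !acc.contains (pvRowGet row "Name")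
        then acc ++ [pvRowGet row "Name"] else acc) []
    = PySem.Set.ofList ((data.filter pvIsT).map pvName) := by
  rw [← PySem.Set.update_nil_left, PySem.Set.update_map_eq_foldl_add, List.foldl_filter]
  apply congrFun
  apply congrFun
  apply congrArg
  funext acc row
  by_cases h : pvRowGet row "Role" == "Teacher"
  · simp [pvIsT, pvName, PySem.Set.add, h]
  · simp [pvIsT, h]

-- the subjects of teacher t, as A computes them = as B computes them
lemma pv_subjects_eq (data : List (List (String × String))) (t : String) :
    List.map (fun (x : String × String) => x.2)
      (List.filter (fun p => p.1 == t) ((data.filter pvIsT).map (fun r => (pvName r, pvSubj r))))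
    = (data.filter (fun row =>
          pvRowGet row "Role" == "Teacher" && pvRowGet row "Name" == t)).map
        (fun row => pvRowGet row "Subject") := by
  rw [List.filter_map, List.map_map]
  rw [show (data.filter (fun row =>
        pvRowGet row "Role" == "Teacher" && pvRowGet row "Name" == t))
      = List.filter ((fun p : String × String => p.1 == t) ∘ fun r => (pvName r, pvSubj r))
          (data.filter pvIsT) from ?_]
  · rfl
  · rw [List.filter_filter]
    apply List.filter_congr
    intro r _
    simp only [Function.comp, pvIsT, pvName]
    by_cases h1 : pvRowGet r "Role" == "Teacher" <;>
      by_cases h2 : pvRowGet r "Name" == t <;> simp [h1, h2]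

-- the whole equivalence (no hypothesis needed: both ports use the same total lookup)
lemma pv_main (data : List (List (String × String))) :
    list_teachers_and_subjects data = list_teachers_and_subjects_alt data := by
  simp only [list_teachers_and_subjects, list_teachers_and_subjects_alt]
  rw [pv_dictA_eq, pv_teachersB_eq]
  set L := (data.filter pvIsT).map (fun r => (pvName r, pvSubj r)) with hL
  have hnames : L.map Prod.fst = (data.filter pvIsT).map pvName := by
    rw [hL, List.map_map]; rfl
  have hnodup :
      (L.foldl (fun d p => d.modify p.1 [] (fun l => l ++ [p.2])) PySem.Dict.empty).keys.Nodup := by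
    exact PySem.Dict.nodup_keys_foldl_modify_key L Prod.fst []
      (fun d p => fun l => l ++ [p.2]) PySem.Dict.empty (by simp [PySem.Dict.keys_empty])
  have hkeys :
      (L.foldl (fun d p => d.modify p.1 [] (fun l => l ++ [p.2])) PySem.Dict.empty).keys
        = PySem.Set.ofList ((data.filter pvIsT).map pvName) := by
    rw [PySem.Dict.keys_foldl_modify_key L Prod.fst [] (fun d p => fun l => l ++ [p.2])]
    rw [PySem.Dict.keys_empty, PySem.Set.update_nil_left, hnames]
  rw [PySem.Dict.items_eq_map_keys _ hnodup [], List.foldl_map, hkeys]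
  rw [pv_foldl_append_join, List.map_map]
  congr 1
  apply congrArg
  apply List.map_congr_left
  intro t _
  dsimp only [Function.comp]
  rw [PySem.Dict.getD_foldl_modify_append, PySem.Dict.getD_empty, List.nil_append,
    pv_subjects_eq, String.append_assoc]

-- ===== VERDICT (by name: the statement is the Claim_ definition above) =====
theorem list_teachers_and_subjects_spec : Claim_equal_list_teachers_and_subjects := by
  intro data _ _
  unfold Spec_list_teachers_and_subjects
  exact pv_main data
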